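-- pv_equiv track=rewrite | github.com/dkiexe/campus_il | self.py/finished_works/Chapter7/7.1.4.py | squared_numbers
-- ===== SOURCE A (Python) =====
-- def squared_numbers(start, stop):
--     final_list=[]
--     final_list.append(start**2)
--     while start<stop:
--         start+=1
--         final_list.append(start**2)
--     final_list.append(stop**2)
--     final_list.pop()
--     return final_list
-- ===== SOURCE B (Python) =====
-- def squared_numbers(start, stop):
--     n = stop - start if stop > start else 0
--     out = []
--     sq = start * start
--     odd = 2 * start + 1
--     for _ in range(n + 1):
--         out.append(sq)
--         sq += odd
--         odd += 2
--     return out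
-- ===== Notes on version B (the rewrite author's own statement) =====
-- stated objective: alternative
-- what changed: Replaces A's while-loop that squares each counter value with a count-then-generate pass that never multiplies inside the loop: it maintains the running square incrementally via consecutive odd increments (sq += odd; odd += 2).
import Mathlib
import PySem

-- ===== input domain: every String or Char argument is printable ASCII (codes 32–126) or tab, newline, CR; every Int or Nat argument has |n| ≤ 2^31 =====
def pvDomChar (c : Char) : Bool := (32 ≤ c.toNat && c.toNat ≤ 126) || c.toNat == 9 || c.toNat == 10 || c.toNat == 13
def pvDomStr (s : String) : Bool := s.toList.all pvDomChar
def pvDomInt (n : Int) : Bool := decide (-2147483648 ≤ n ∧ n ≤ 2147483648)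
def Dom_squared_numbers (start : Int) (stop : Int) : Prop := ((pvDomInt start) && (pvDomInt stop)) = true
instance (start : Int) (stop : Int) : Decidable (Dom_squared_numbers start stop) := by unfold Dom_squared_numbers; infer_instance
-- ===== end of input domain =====

-- B replaces A's while-loop that squares each counter value by a count-then-generate pass that
-- maintains the running square via consecutive odd increments (sq += odd; odd += 2), with no
-- multiplication inside the loop (objective: alternative).

-- ===== PORT A =====
-- while start < stop: start += 1; final_list.append(start**2)
def squaredLoopA (start stop : Int) (acc : List Int) : List Int :=
  if start < stop then squaredLoopA (start + 1) stop (acc ++ [(start + 1) ^ 2]) else acc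
termination_by (stop - start).toNat
decreasing_by omega

def squared_numbers (start : Int) (stop : Int) : List Int :=
  let l := ([] : List Int) ++ [start ^ 2]          -- final_list.append(start**2)
  let l := squaredLoopA start stop l               -- the while loop
  let l := l ++ [stop ^ 2]                         -- final_list.append(stop**2)
  l.dropLast                                       -- final_list.pop() (list nonempty: removes the last element)

-- ===== PORT B =====
-- for _ in range(n+1): out.append(sq); sq += odd; odd += 2
def altLoop : Nat → Int → Int → List Int → List Int
  | 0, _, _, out => out
  | k + 1, sq, odd, out => altLoop k (sq + odd) (odd + 2) (out ++ [sq])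

def squared_numbers_alt (start : Int) (stop : Int) : List Int :=
  let n : Int := if stop > start then stop - start else 0
  altLoop (n + 1).toNat (start * start) (2 * start + 1) []

-- ===== PRECONDITION & SPEC =====
def Spec_squared_numbers (start : Int) (stop : Int) (out : List Int) : Prop := out = squared_numbers_alt start stop
instance (start : Int) (stop : Int) (out : List Int) : Decidable (Spec_squared_numbers start stop out) := by unfold Spec_squared_numbers; infer_instance

-- ===== CLAIM =====
def Claim_equal_squared_numbers : Prop := ∀ (start : Int) (stop : Int), Dom_squared_numbers start stop → Spec_squared_numbers start stop (squared_numbers start stop)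

-- ===== LEMMAS AND PROOFS =====

-- A's loop appends the squares of start+1 .. stop.
theorem squaredLoopA_eq (n : Nat) : ∀ (start stop : Int) (acc : List Int),
    (stop - start).toNat = n →
    squaredLoopA start stop acc
      = acc ++ (PySem.List.pyRange (start + 1) (stop + 1) 1).map (fun x => x ^ 2) := by
  induction n with
  | zero =>
    intro start stop acc h
    rw [squaredLoopA, if_neg (by omega), PySem.List.pyRange_one]
    have h0 : (stop + 1 - (start + 1)).toNat = 0 := by omega
    rw [h0]; simp
  | succ m ih =>
    intro start stop acc h
    rw [squaredLoopA, if_pos (by omega)]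
    rw [ih (start + 1) stop _ (by omega)]
    rw [PySem.List.pyRange_one_cons (by omega : start + 1 < stop + 1)]
    simp

-- B's loop, started with the square/odd invariant at v, appends the squares of v, v+1, …
theorem altLoop_eq (k : Nat) : ∀ (v : Int) (out : List Int),
    altLoop k (v * v) (2 * v + 1) out
      = out ++ (List.range k).map (fun i : Nat => (v + (i : Int)) ^ 2) := by
  induction k with
  | zero => intro v out; simp [altLoop]
  | succ m ih =>
    intro v out
    have h1 : v * v + (2 * v + 1) = (v + 1) * (v + 1) := by ring
    have h2 : 2 * v + 1 + 2 = 2 * (v + 1) + 1 := by ring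
    rw [altLoop, h1, h2, ih (v + 1)]
    rw [List.range_succ_eq_map]
    simp only [List.map_cons, List.map_map, List.append_assoc, List.cons_append, List.nil_append]
    congr 2
    · push_cast; ring
    · apply List.map_congr_left
      intro i _
      simp only [Function.comp_apply]
      push_cast
      ring

-- ===== VERDICT =====
theorem squared_numbers_spec : Claim_equal_squared_numbers := by
  intro start stop _
  show squared_numbers start stop = squared_numbers_alt start stop
  simp only [squared_numbers, squared_numbers_alt]
  rw [squaredLoopA_eq (stop - start).toNat start stop _ rfl]
  rw [altLoop_eq _ start]
  set n : Int := if stop > start then stop - start else 0 with hn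
  rw [PySem.List.pyRange_one]
  have he : (stop + 1 - (start + 1)).toNat = n.toNat := by
    simp only [hn]; split_ifs <;> omega
  have hk : (n + 1).toNat = n.toNat + 1 := by simp only [hn]; split_ifs <;> omega
  rw [he, hk, List.range_succ_eq_map]
  simp only [List.map_cons, List.map_map, List.nil_append]
  rw [List.dropLast_concat, List.singleton_append]
  congr 1
  · push_cast; ring
  apply List.map_congr_left
  intro i _
  simp only [Function.comp_apply]
  push_cast
  ring
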